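-- pv_equiv track=rewrite | github.com/neko-kyuu/my-playground-sandbox | MCP/obsidian_graphrag_mcp/server.py | _select_sources_by_tags
-- ===== SOURCE A (Python) =====
-- from typing import Any, Dict, List, Optional, Set, Tuple, Literal, Union
--
-- def _select_sources_by_tags(nodes_meta: Dict[str, Dict[str, Any]], tags: List[str], mode: Literal["any", "all"]) -> Set[str]:
--     if not tags:
--         return set(nodes_meta.keys())
--
--     tag_set = set(tags)
--     matched: Set[str] = set()
--
--     for source, meta in (nodes_meta or {}).items():
--         source_tags = set(str(x).lower() for x in ((meta or {}).get("tags") or []))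
--         if mode == "all":
--             ok = tag_set.issubset(source_tags)
--         else:
--             ok = bool(source_tags & tag_set)
--         if ok:
--             matched.add(source)
--
--     return matched
-- ===== SOURCE B (Python) =====
-- def _select_sources_by_tags(nodes_meta, tags, mode):
--     if not tags:
--         return set(nodes_meta.keys())
--
--     # Stage 1: one pass over the sources builds an inverted index
--     # (lowercased source tag -> set of source names carrying it).
--     index = {}
--     for source, meta in (nodes_meta or {}).items():
--         for x in ((meta or {}).get("tags") or []):
--             index.setdefault(str(x).lower(), set()).add(source)
--
--     # Stage 2: pure set algebra over the query tags restricts the key set.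
--     matched = set((nodes_meta or {}).keys())
--     if mode == "all":
--         for t in tags:
--             matched &= index.get(t, set())
--     else:
--         hit = set()
--         for t in tags:
--             hit |= index.get(t, set())
--         matched &= hit
--     return matched
-- ===== Notes on version B (the rewrite author's own statement) =====
-- stated objective: alternative
-- what changed: B builds an inverted index (lowercased tag -> set of source names) in one pass and then computes the answer purely by set algebra over the query tags (intersection of index sets for 'all', union then restriction for 'any'), instead of A's per-source normalise-and-test loop.
import Mathlib
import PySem

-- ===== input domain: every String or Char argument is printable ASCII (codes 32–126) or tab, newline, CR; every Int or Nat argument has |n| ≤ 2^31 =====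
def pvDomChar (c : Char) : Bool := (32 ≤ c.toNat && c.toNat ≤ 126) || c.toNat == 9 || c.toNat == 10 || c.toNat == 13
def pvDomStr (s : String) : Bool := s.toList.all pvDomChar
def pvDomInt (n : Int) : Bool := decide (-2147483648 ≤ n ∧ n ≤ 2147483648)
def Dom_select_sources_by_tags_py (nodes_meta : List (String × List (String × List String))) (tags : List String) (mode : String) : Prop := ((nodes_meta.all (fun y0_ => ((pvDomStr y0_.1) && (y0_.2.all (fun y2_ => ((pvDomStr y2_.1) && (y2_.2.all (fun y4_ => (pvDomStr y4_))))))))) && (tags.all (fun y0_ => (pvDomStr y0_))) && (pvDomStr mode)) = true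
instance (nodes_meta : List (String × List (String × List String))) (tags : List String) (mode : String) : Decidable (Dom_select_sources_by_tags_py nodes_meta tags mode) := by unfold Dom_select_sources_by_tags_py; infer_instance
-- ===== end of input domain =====

-- B replaces A's per-source normalise-and-test loop by an inverted index
-- (lowercased tag -> set of sources) queried with set algebra (objective: alternative).

-- ===== PORT A =====
def select_sources_by_tags_py (nodes_meta : List (String × List (String × List String))) (tags : List String) (mode : String) : List String :=
  if tags.isEmpty then PySem.Set.ofList (nodes_meta.map (fun p => p.1))
  else
    let tag_set : PySem.Set String := PySem.Set.ofList tags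
    nodes_meta.foldl (fun matched sm =>
      let source := sm.1
      let mt := sm.2
      -- (mt or {}).get("tags") or []  — getD returns [] for a missing key, and 'or []' maps an empty value to [] (same list)
      let source_tags : PySem.Set String :=
        PySem.Set.ofList (((PySem.Dict.ofList mt).getD "tags" []).map (fun x => PySem.Str.lower x))
      let ok : Bool :=
        if mode == "all" then PySem.Set.issubset tag_set source_tags
        else !(PySem.Set.inter source_tags tag_set).isEmpty
      if ok then PySem.Set.add matched source else matched) []

-- ===== PORT B =====
-- body of Source B's index-building loop over one source's tag list
def pvIndexStep (d : PySem.Dict String (PySem.Set String)) (sm : String × List (String × List String)) : PySem.Dict String (PySem.Set String) :=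
  (((PySem.Dict.ofList sm.2).getD "tags" []).foldl
    (fun d x => PySem.Dict.modify d (PySem.Str.lower x) [] (fun s => PySem.Set.add s sm.1)) d)

def select_sources_by_tags_py_alt (nodes_meta : List (String × List (String × List String))) (tags : List String) (mode : String) : List String :=
  if tags.isEmpty then PySem.Set.ofList (nodes_meta.map (fun p => p.1))
  else
    let index : PySem.Dict String (PySem.Set String) :=
      nodes_meta.foldl pvIndexStep PySem.Dict.empty
    let matched : PySem.Set String := PySem.Set.ofList (nodes_meta.map (fun p => p.1))
    if mode == "all" then
      tags.foldl (fun m t => PySem.Set.inter m (index.getD t [])) matched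
    else
      let hit : PySem.Set String := tags.foldl (fun h t => PySem.Set.union h (index.getD t [])) []
      PySem.Set.inter matched hit

-- ===== PRECONDITION & SPEC =====
-- Pre_ excludes association lists with duplicate source keys: a Python dict cannot
-- represent them (the literal collapses duplicates), so behaviour there is an artefact
-- of the list encoding and A's and B's readings of the duplicates are both accidental.
def Pre_select_sources_by_tags_py (nodes_meta : List (String × List (String × List String))) (tags : List String) (mode : String) : Prop :=
  (nodes_meta.map (fun p => p.1)).Nodup
instance (nodes_meta : List (String × List (String × List String))) (tags : List String) (mode : String) : Decidable (Pre_select_sources_by_tags_py nodes_meta tags mode) := by unfold Pre_select_sources_by_tags_py; infer_instance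

def pvWitness_select_sources_by_tags_py : (List (String × List (String × List String))) × List String × String :=
  ([("a", [("tags", ["x", "y"])]), ("b", [("tags", ["z"])])], ["x"], "any")

def Spec_select_sources_by_tags_py (nodes_meta : List (String × List (String × List String))) (tags : List String) (mode : String) (out : List String) : Prop := out = select_sources_by_tags_py_alt nodes_meta tags mode
instance (nodes_meta : List (String × List (String × List String))) (tags : List String) (mode : String) (out : List String) : Decidable (Spec_select_sources_by_tags_py nodes_meta tags mode out) := by unfold Spec_select_sources_by_tags_py; infer_instance

-- ===== CLAIM (what is proved, stated in full; the proofs are below) =====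
def Claim_equal_select_sources_by_tags_py : Prop := ∀ (nodes_meta : List (String × List (String × List String))) (tags : List String) (mode : String), Dom_select_sources_by_tags_py nodes_meta tags mode → Pre_select_sources_by_tags_py nodes_meta tags mode → Spec_select_sources_by_tags_py nodes_meta tags mode (select_sources_by_tags_py nodes_meta tags mode)

-- ===== LEMMAS AND PROOFS =====

-- the (lowercased) tag list of one source's metadata
def pvTagsOf (mt : List (String × List String)) : List String :=
  ((PySem.Dict.ofList mt).getD "tags" []).map (fun x => PySem.Str.lower x)

-- folding a conditional Set.add equals set(...) of the filtered, projected list.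
theorem foldl_add_filter {α : Type} [BEq α] (xs : List (α × List (α × List α)))
    (q : α × List (α × List α) → Bool) (s : PySem.Set α) :
    xs.foldl (fun matched sm => if q sm then PySem.Set.add matched sm.1 else matched) s
      = ((xs.filter q).map (fun p => p.1)).foldl PySem.Set.add s := by
  induction xs generalizing s with
  | nil => rfl
  | cons x xs ih =>
      by_cases h : q x <;> simp [h, ih]

theorem inter_eq_filter {α : Type} [BEq α] (s t : List α) :
    PySem.Set.inter s t = s.filter (fun x => PySem.Set.contains t x) := rfl

theorem foldl_inter (tags : List String) (g : String → List String) (m0 : List String) :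
    tags.foldl (fun m t => PySem.Set.inter m (g t)) m0
      = m0.filter (fun k => tags.all (fun t => PySem.Set.contains (g t) k)) := by
  induction tags generalizing m0 with
  | nil => simp
  | cons t ts ih =>
      rw [List.foldl_cons, ih, inter_eq_filter, List.filter_filter]
      refine List.filter_congr (fun x _ => ?_)
      simp [List.all_cons, Bool.and_comm]

theorem mem_foldl_union (tags : List String) (g : String → List String) (h0 : List String) (k : String) :
    k ∈ tags.foldl (fun h t => PySem.Set.union h (g t)) h0 ↔ k ∈ h0 ∨ ∃ t ∈ tags, k ∈ g t := by
  induction tags generalizing h0 with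
  | nil => simp
  | cons t ts ih =>
      simp [ih, PySem.Set.mem_union]
      tauto

-- membership in the index after one source's inner loop
theorem mem_inner (L : List String) (d : PySem.Dict String (PySem.Set String)) (src k t : String) :
    k ∈ ((L.foldl (fun d x => PySem.Dict.modify d (PySem.Str.lower x) [] (fun s => PySem.Set.add s src)) d).getD t [])
      ↔ k ∈ d.getD t [] ∨ (k = src ∧ t ∈ L.map (fun x => PySem.Str.lower x)) := by
  induction L generalizing d with
  | nil => simp
  | cons x xs ih =>
      simp only [List.foldl_cons, ih, PySem.Dict.getD_modify, List.map_cons, List.mem_cons]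
      by_cases h : t = PySem.Str.lower x
      · simp [h, PySem.Set.mem_add]
        try tauto
      · simp [h]
        try tauto

-- membership in the whole inverted index
theorem mem_index (l : List (String × List (String × List String)))
    (d : PySem.Dict String (PySem.Set String)) (k t : String) :
    k ∈ ((l.foldl pvIndexStep d).getD t [])
      ↔ k ∈ d.getD t [] ∨ ∃ sm ∈ l, sm.1 = k ∧ t ∈ pvTagsOf sm.2 := by
  induction l generalizing d with
  | nil => simp
  | cons sm l ih =>
      simp only [List.foldl_cons, ih, pvIndexStep, mem_inner, pvTagsOf, List.mem_cons]
      aesop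

-- with unique source keys, B's per-tag 'all' test over the index equals A's per-source subset test
theorem all_pred_eq (nodes : List (String × List (String × List String)))
    (hnd : (nodes.map (fun p => p.1)).Nodup) (tags : List String)
    (sm : String × List (String × List String)) (hsm : sm ∈ nodes) :
    tags.all (fun t => PySem.Set.contains ((nodes.foldl pvIndexStep PySem.Dict.empty).getD t []) sm.1)
      = PySem.Set.issubset (PySem.Set.ofList tags) (PySem.Set.ofList (pvTagsOf sm.2)) := by
  apply Bool.eq_iff_iff.mpr
  simp only [List.all_eq_true, PySem.Set.contains_iff, mem_index, PySem.Dict.getD_empty,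
    List.not_mem_nil, false_or, PySem.Set.issubset_iff, PySem.Set.mem_ofList]
  constructor
  · intro h t ht
    obtain ⟨sm', hm', he, htag⟩ := h t ht
    have := List.inj_on_of_nodup_map hnd hm' hsm he
    subst this
    exact htag
  · intro h t ht
    exact ⟨sm, hsm, rfl, h t ht⟩

-- with unique source keys, B's membership in the union over the query tags equals A's intersection test
theorem any_pred_eq (nodes : List (String × List (String × List String)))
    (hnd : (nodes.map (fun p => p.1)).Nodup) (tags : List String)
    (sm : String × List (String × List String)) (hsm : sm ∈ nodes) :
    PySem.Set.contains
      (tags.foldl (fun h t => PySem.Set.union h ((nodes.foldl pvIndexStep PySem.Dict.empty).getD t [])) []) sm.1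
      = !(PySem.Set.inter (PySem.Set.ofList (pvTagsOf sm.2)) (PySem.Set.ofList tags)).isEmpty := by
  apply Bool.eq_iff_iff.mpr
  simp [mem_foldl_union, mem_index, PySem.Set.mem_ofList, inter_eq_filter]
  constructor
  · rintro ⟨t, ht, b, hb, htag⟩
    have h : (sm.1, b) = sm := List.inj_on_of_nodup_map hnd hb hsm rfl
    have hb2 : b = sm.2 := congrArg Prod.snd h
    subst hb2
    exact ⟨t, htag, ht⟩
  · rintro ⟨x, hx, hxt⟩
    exact ⟨x, hxt, sm.2, by simpa using hsm, hx⟩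

-- ===== VERDICT (by name: the statement is the Claim_ definition above) =====
theorem select_sources_by_tags_py_spec : Claim_equal_select_sources_by_tags_py := by
  intro nodes_meta tags mode _ hnd
  unfold Pre_select_sources_by_tags_py at hnd
  unfold Spec_select_sources_by_tags_py select_sources_by_tags_py select_sources_by_tags_py_alt
  by_cases htags : tags.isEmpty
  · simp [htags]
  · have hkeys : PySem.Set.ofList (nodes_meta.map (fun p => p.1)) = nodes_meta.map (fun p => p.1) :=
      PySem.Set.ofList_eq_self_of_nodup _ hnd
    by_cases hm : mode == "all" <;>
      simp only [htags, Bool.false_eq_true, if_false, hm, if_true]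
    · rw [foldl_add_filter, ← PySem.Set.ofList_eq_foldl,
        PySem.Set.ofList_eq_self_of_nodup _ (hnd.sublist (List.Sublist.map _ List.filter_sublist)),
        foldl_inter, hkeys, List.filter_map]
      refine congrArg (List.map _) (List.filter_congr fun sm hsm => ?_)
      exact (all_pred_eq nodes_meta hnd tags sm hsm).symm
    · rw [foldl_add_filter, ← PySem.Set.ofList_eq_foldl,
        PySem.Set.ofList_eq_self_of_nodup _ (hnd.sublist (List.Sublist.map _ List.filter_sublist)),
        inter_eq_filter, hkeys, List.filter_map]
      refine congrArg (List.map _) (List.filter_congr fun sm hsm => ?_)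
      exact (any_pred_eq nodes_meta hnd tags sm hsm).symm
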